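-- pv_equiv track=rewrite | github.com/NoerNova/tesstrain-shn | shan-datasets/text2img_data_generator.py | get_font_name
-- ===== SOURCE A (Python) =====
-- def get_font_name(line_count, total_count):
--     fonts = ["GreatHorKham Taunggyi", "Myanmar Text", "PangLong Italic", "Pyidaungsu", "Shan"]
--     num_fonts = len(fonts)
--
--     range_size = total_count // num_fonts
--
--     font_ranges = [(i * range_size, (i + 1) * range_size, fonts[i]) for i in range(num_fonts)]
--
--     for min_val, max_val, font in font_ranges:
--         if min_val <= line_count < max_val:
--             return font
--
--     return "Shan"  # Default
-- ===== SOURCE B (Python) =====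
-- def get_font_name(line_count, total_count):
--     fonts = ["GreatHorKham Taunggyi", "Myanmar Text", "PangLong Italic", "Pyidaungsu", "Shan"]
--     range_size = total_count // len(fonts)
--     if range_size <= 0:
--         return "Shan"
--     idx = line_count // range_size
--     if 0 <= idx < len(fonts):
--         return fonts[idx]
--     return "Shan"
-- ===== Notes on version B (the rewrite author's own statement) =====
-- stated objective: simpler
-- what changed: Replaces the bucket-table construction and linear first-match scan with a single floor division line_count // range_size that computes the bucket index directly.
import Mathlib
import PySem

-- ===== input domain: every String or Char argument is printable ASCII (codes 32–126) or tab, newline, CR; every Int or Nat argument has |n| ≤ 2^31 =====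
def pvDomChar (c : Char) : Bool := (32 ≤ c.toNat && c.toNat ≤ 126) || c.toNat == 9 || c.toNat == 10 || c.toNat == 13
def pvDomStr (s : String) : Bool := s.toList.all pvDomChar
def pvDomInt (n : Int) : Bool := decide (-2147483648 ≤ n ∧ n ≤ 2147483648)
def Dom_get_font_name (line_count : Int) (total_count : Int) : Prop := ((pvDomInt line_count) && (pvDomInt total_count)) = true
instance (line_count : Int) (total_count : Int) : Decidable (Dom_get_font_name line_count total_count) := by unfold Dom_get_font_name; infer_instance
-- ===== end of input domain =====

-- B replaces A's bucket-table construction and linear first-match scan by one floor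
-- division computing the bucket index directly (objective: simpler).


-- ===== PORT A =====
-- the for-loop with an early return: first matching bucket, else the default
def pvScanA (line_count : Int) : List (Int × Int × String) → String
  | [] => "Shan"
  | (min_val, max_val, font) :: rest =>
      if min_val ≤ line_count ∧ line_count < max_val then font else pvScanA line_count rest

def get_font_name (line_count : Int) (total_count : Int) : String :=
  let fonts : List String := ["GreatHorKham Taunggyi", "Myanmar Text", "PangLong Italic", "Pyidaungsu", "Shan"]
  let num_fonts : Int := fonts.length
  let range_size := PySem.Int.floordiv total_count num_fonts
  let font_ranges := (PySem.List.pyRange 0 num_fonts 1).map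
    (fun i => (i * range_size, (i + 1) * range_size, PySem.List.pyGetD fonts i "Shan"))
  pvScanA line_count font_ranges

-- ===== PORT B =====
def get_font_name_alt (line_count : Int) (total_count : Int) : String :=
  let fonts : List String := ["GreatHorKham Taunggyi", "Myanmar Text", "PangLong Italic", "Pyidaungsu", "Shan"]
  let range_size := PySem.Int.floordiv total_count (fonts.length : Int)
  if range_size ≤ 0 then "Shan"
  else
    let idx := PySem.Int.floordiv line_count range_size
    if 0 ≤ idx ∧ idx < (fonts.length : Int) then PySem.List.pyGetD fonts idx "Shan" else "Shan"

-- ===== PRECONDITION & SPEC =====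
def Spec_get_font_name (line_count : Int) (total_count : Int) (out : String) : Prop := out = get_font_name_alt line_count total_count
instance (line_count : Int) (total_count : Int) (out : String) : Decidable (Spec_get_font_name line_count total_count out) := by unfold Spec_get_font_name; infer_instance

-- ===== CLAIM (what is proved, stated in full; the proofs are below) =====
def Claim_equal_get_font_name : Prop := ∀ (line_count : Int) (total_count : Int), Dom_get_font_name line_count total_count → Spec_get_font_name line_count total_count (get_font_name line_count total_count)

-- ===== LEMMAS AND PROOFS =====

theorem pyRange05 : PySem.List.pyRange 0 5 1 = [0, 1, 2, 3, 4] := by decide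

theorem fdiv_bracket (a b q : Int) (hb : 0 < b) :
    PySem.Int.floordiv a b = q ↔ q * b ≤ a ∧ a < (q + 1) * b :=
  PySem.Int.floordiv_eq_iff_of_pos hb

-- ===== VERDICT (by name: the statement is the Claim_ definition above) =====
theorem get_font_name_spec : Claim_equal_get_font_name := by
  intro lc tc _
  unfold Spec_get_font_name get_font_name get_font_name_alt
  simp only [List.length_cons, List.length_nil]
  norm_num [pyRange05, pvScanA]
  set rs := tc / 5 with hrs
  set idx := PySem.Int.floordiv lc rs with hidx
  by_cases hpos : 0 < rs
  · have hne : ¬ rs ≤ 0 := by omega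
    by_cases c1 : 0 ≤ lc ∧ lc < rs
    · have h0 : idx = 0 := (fdiv_bracket lc rs 0 hpos).mpr (by omega)
      simp [c1, h0, hne]
    · by_cases c2 : rs ≤ lc ∧ lc < 2 * rs
      · have h0 : idx = 1 := (fdiv_bracket lc rs 1 hpos).mpr (by omega)
        simp [c1, c2, h0, hne]
      · by_cases c3 : 2 * rs ≤ lc ∧ lc < 3 * rs
        · have h0 : idx = 2 := (fdiv_bracket lc rs 2 hpos).mpr (by omega)
          simp [c1, c2, c3, h0, hne]
        · by_cases c4 : 3 * rs ≤ lc ∧ lc < 4 * rs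
          · have h0 : idx = 3 := (fdiv_bracket lc rs 3 hpos).mpr (by omega)
            simp [c1, c2, c3, c4, h0, hne]
          · by_cases c5 : 4 * rs ≤ lc ∧ lc < 5 * rs
            · have h0 : idx = 4 := (fdiv_bracket lc rs 4 hpos).mpr (by omega)
              simp [c1, c2, c3, c4, c5, h0, hne]
            · have hout : ¬ (0 ≤ idx ∧ idx < 5) := by
                rintro ⟨hl, hu⟩
                have hb := (fdiv_bracket lc rs idx hpos).mp rfl
                interval_cases idx <;> omega
              simp [c1, c2, c3, c4, c5, hne, hout]
  · have h1 : rs ≤ 0 := by omega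
    have c1 : ¬ (0 ≤ lc ∧ lc < rs) := by omega
    have c2 : ¬ (rs ≤ lc ∧ lc < 2 * rs) := by omega
    have c3 : ¬ (2 * rs ≤ lc ∧ lc < 3 * rs) := by omega
    have c4 : ¬ (3 * rs ≤ lc ∧ lc < 4 * rs) := by omega
    have c5 : ¬ (4 * rs ≤ lc ∧ lc < 5 * rs) := by omega
    simp [c1, c2, c3, c4, c5, h1]
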